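-- pv_equiv track=rewrite | github.com/cblab/stock-project | stock-system/src/reporting/report_builder.py | _mapping_issues_payload
-- ===== SOURCE A (Python) =====
-- def _mapping_issues_payload(rows: list[dict]) -> dict:
--     mapped = [
--         _issue_item(row)
--         for row in rows
--         if row.get("mapping_status") in {"mapped", "configured_direct"}
--     ]
--     market_issues = [
--         _issue_item(row)
--         for row in rows
--         if row.get("market_data_status") != "ok"
--     ]
--     news_issues = [
--         _issue_item(row)
--         for row in rows
--         if row.get("news_status") != "ok"
--     ]
--     manual_review = [
--         _issue_item(row)
--         for row in rows
--         if row.get("market_data_status") != "ok"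
--         or row.get("news_status") != "ok"
--         or row.get("sentiment_status") in {"no_context_articles", "no_articles"}
--         or row.get("provider_ticker") in {"SIVE.ST", "ENR.DE"}
--     ]
--     return {
--         "mapped_tickers": mapped,
--         "market_data_issues": market_issues,
--         "news_issues": news_issues,
--         "manual_review": manual_review,
--     }
--
-- def _issue_item(row: dict) -> dict:
--     return {
--         "input_ticker": row.get("input_ticker"),
--         "provider_ticker": row.get("provider_ticker"),
--         "region": row.get("region"),
--         "asset_class": row.get("asset_class"),
--         "sentiment_mode": row.get("sentiment_mode"),
--         "mapping_status": row.get("mapping_status"),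
--         "mapping_note": row.get("mapping_note"),
--         "market_data_status": row.get("market_data_status"),
--         "news_status": row.get("news_status"),
--     }
-- ===== SOURCE B (Python) =====
-- _ITEM_KEYS = (
--     "input_ticker", "provider_ticker", "region", "asset_class",
--     "sentiment_mode", "mapping_status", "mapping_note",
--     "market_data_status", "news_status",
-- )
--
-- _BUCKET_NAMES = ("mapped_tickers", "market_data_issues", "news_issues", "manual_review")
--
--
-- def _issue_item(row):
--     return {k: row.get(k) for k in _ITEM_KEYS}
--
--
-- def _buckets_of(row):
--     """Names of the payload buckets this row belongs to."""
--     names = []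
--     if row.get("mapping_status") in ("mapped", "configured_direct"):
--         names.append("mapped_tickers")
--     if row.get("market_data_status") != "ok":
--         names.append("market_data_issues")
--     if row.get("news_status") != "ok":
--         names.append("news_issues")
--     if (row.get("market_data_status") != "ok"
--             or row.get("news_status") != "ok"
--             or row.get("sentiment_status") in ("no_context_articles", "no_articles")
--             or row.get("provider_ticker") in ("SIVE.ST", "ENR.DE")):
--         names.append("manual_review")
--     return names
--
--
-- def _mapping_issues_payload(rows):
--     # Stage 1: flatten rows into a tagged stream of (bucket_name, item) pairs.
--     tagged = [(name, _issue_item(row)) for row in rows for name in _buckets_of(row)]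
--     # Stage 2: group the tagged stream by bucket name.
--     payload = {name: [] for name in _BUCKET_NAMES}
--     for name, item in tagged:
--         payload[name].append(item)
--     return payload
-- ===== Notes on version B (the rewrite author's own statement) =====
-- stated objective: alternative
-- what changed: B replaces A's four independent filter-comprehension scans with a tag-then-group pipeline: each row is flattened into a stream of (bucket_name, item) pairs via a classifier _buckets_of, and a second pass groups that stream into a dict of lists preloaded with the four bucket keys.
import Mathlib
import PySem

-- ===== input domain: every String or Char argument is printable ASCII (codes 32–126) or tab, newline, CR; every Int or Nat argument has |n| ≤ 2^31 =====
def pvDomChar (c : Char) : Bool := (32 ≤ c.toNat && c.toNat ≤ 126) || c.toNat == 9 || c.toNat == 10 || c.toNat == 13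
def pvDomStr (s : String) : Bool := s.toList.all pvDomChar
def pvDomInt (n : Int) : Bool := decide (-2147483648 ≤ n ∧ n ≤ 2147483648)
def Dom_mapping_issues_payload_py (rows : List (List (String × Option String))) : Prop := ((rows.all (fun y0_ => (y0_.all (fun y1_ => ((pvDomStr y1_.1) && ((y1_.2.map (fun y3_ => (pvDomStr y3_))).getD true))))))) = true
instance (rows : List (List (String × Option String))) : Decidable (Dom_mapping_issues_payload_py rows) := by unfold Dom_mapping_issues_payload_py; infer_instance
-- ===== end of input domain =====

-- B replaces A's four separate comprehension scans with a tag-then-group pipeline: flatten rows into a (bucket-name, item) stream, then group it into a dict of lists (same asymptotic cost).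

-- ===== PORT A =====
-- row.get(k): dict lookup with default None
def pvGetA (row : List (String × Option String)) (k : String) : Option String :=
  PySem.Dict.getD (PySem.Dict.mk row) k none

def issue_item_py (row : List (String × Option String)) : List (String × Option String) :=
  [("input_ticker", pvGetA row "input_ticker"),
   ("provider_ticker", pvGetA row "provider_ticker"),
   ("region", pvGetA row "region"),
   ("asset_class", pvGetA row "asset_class"),
   ("sentiment_mode", pvGetA row "sentiment_mode"),
   ("mapping_status", pvGetA row "mapping_status"),
   ("mapping_note", pvGetA row "mapping_note"),
   ("market_data_status", pvGetA row "market_data_status"),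
   ("news_status", pvGetA row "news_status")]

def mapping_issues_payload_py (rows : List (List (String × Option String))) : List (String × List (List (String × Option String))) :=
  let mapped := (rows.filter (fun row =>
      pvGetA row "mapping_status" == some "mapped" || pvGetA row "mapping_status" == some "configured_direct")).map issue_item_py
  let market_issues := (rows.filter (fun row =>
      !(pvGetA row "market_data_status" == some "ok"))).map issue_item_py
  let news_issues := (rows.filter (fun row =>
      !(pvGetA row "news_status" == some "ok"))).map issue_item_py
  let manual_review := (rows.filter (fun row =>
      !(pvGetA row "market_data_status" == some "ok")
      || !(pvGetA row "news_status" == some "ok")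
      || (pvGetA row "sentiment_status" == some "no_context_articles" || pvGetA row "sentiment_status" == some "no_articles")
      || (pvGetA row "provider_ticker" == some "SIVE.ST" || pvGetA row "provider_ticker" == some "ENR.DE"))).map issue_item_py
  [("mapped_tickers", mapped),
   ("market_data_issues", market_issues),
   ("news_issues", news_issues),
   ("manual_review", manual_review)]

-- ===== PORT B =====
def pvGetB (row : List (String × Option String)) (k : String) : Option String :=
  PySem.Dict.getD (PySem.Dict.mk row) k none

def pvItemKeys : List String :=
  ["input_ticker", "provider_ticker", "region", "asset_class",
   "sentiment_mode", "mapping_status", "mapping_note",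
   "market_data_status", "news_status"]

def pvBucketNames : List String :=
  ["mapped_tickers", "market_data_issues", "news_issues", "manual_review"]

def issue_item_alt (row : List (String × Option String)) : List (String × Option String) :=
  pvItemKeys.map (fun k => (k, pvGetB row k))

-- names of the payload buckets this row belongs to (B's _buckets_of)
def bucketsOf (row : List (String × Option String)) : List String :=
  (if pvGetB row "mapping_status" == some "mapped" || pvGetB row "mapping_status" == some "configured_direct"
     then ["mapped_tickers"] else []) ++
  (if !(pvGetB row "market_data_status" == some "ok") then ["market_data_issues"] else []) ++
  (if !(pvGetB row "news_status" == some "ok") then ["news_issues"] else []) ++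
  (if !(pvGetB row "market_data_status" == some "ok")
      || !(pvGetB row "news_status" == some "ok")
      || (pvGetB row "sentiment_status" == some "no_context_articles" || pvGetB row "sentiment_status" == some "no_articles")
      || (pvGetB row "provider_ticker" == some "SIVE.ST" || pvGetB row "provider_ticker" == some "ENR.DE")
     then ["manual_review"] else [])

def mapping_issues_payload_py_alt (rows : List (List (String × Option String))) : List (String × List (List (String × Option String))) :=
  -- Stage 1: flatten rows into a tagged (bucket-name, item) stream
  let tagged := rows.flatMap (fun row => (bucketsOf row).map (fun name => (name, issue_item_alt row)))
  -- Stage 2: group the tagged stream by bucket name into a dict preloaded with the four keys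
  let payload0 : PySem.Dict String (List (List (String × Option String))) :=
    pvBucketNames.foldl (fun d name => d.insert name []) PySem.Dict.empty
  let payload := tagged.foldl (fun d p => d.modify p.1 [] (· ++ [p.2])) payload0
  payload.items

-- ===== PRECONDITION & SPEC =====
def Spec_mapping_issues_payload_py (rows : List (List (String × Option String))) (out : List (String × List (List (String × Option String)))) : Prop := out = mapping_issues_payload_py_alt rows
instance (rows : List (List (String × Option String))) (out : List (String × List (List (String × Option String)))) : Decidable (Spec_mapping_issues_payload_py rows out) := by unfold Spec_mapping_issues_payload_py; infer_instance

-- ===== CLAIM (what is proved, stated in full; the proofs are below) =====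
def Claim_equal_mapping_issues_payload_py : Prop := ∀ (rows : List (List (String × Option String))), Dom_mapping_issues_payload_py rows → Spec_mapping_issues_payload_py rows (mapping_issues_payload_py rows)

-- ===== LEMMAS AND PROOFS =====
-- abbreviation used only by the proofs: a four-bucket dict literal
def mkD (a b c d : List (List (String × Option String))) :
    PySem.Dict String (List (List (String × Option String))) :=
  PySem.Dict.mk [("mapped_tickers", a), ("market_data_issues", b), ("news_issues", c), ("manual_review", d)]

def fMapped (rows : List (List (String × Option String))) : List (List (String × Option String)) :=
  (rows.filter (fun row =>
      pvGetA row "mapping_status" == some "mapped" || pvGetA row "mapping_status" == some "configured_direct")).map issue_item_py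
def fMarket (rows : List (List (String × Option String))) : List (List (String × Option String)) :=
  (rows.filter (fun row => !(pvGetA row "market_data_status" == some "ok"))).map issue_item_py
def fNews (rows : List (List (String × Option String))) : List (List (String × Option String)) :=
  (rows.filter (fun row => !(pvGetA row "news_status" == some "ok"))).map issue_item_py
def fManual (rows : List (List (String × Option String))) : List (List (String × Option String)) :=
  (rows.filter (fun row =>
      !(pvGetA row "market_data_status" == some "ok")
      || !(pvGetA row "news_status" == some "ok")
      || (pvGetA row "sentiment_status" == some "no_context_articles" || pvGetA row "sentiment_status" == some "no_articles")
      || (pvGetA row "provider_ticker" == some "SIVE.ST" || pvGetA row "provider_ticker" == some "ENR.DE"))).map issue_item_py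

theorem issue_item_alt_eq (row : List (String × Option String)) :
    issue_item_alt row = issue_item_py row := by
  simp [issue_item_alt, issue_item_py, pvItemKeys, pvGetA, pvGetB]

theorem modify_mapped (a b c d : List (List (String × Option String))) (v : List (String × Option String)) :
    (mkD a b c d).modify "mapped_tickers" [] (· ++ [v]) = mkD (a ++ [v]) b c d := by rfl
theorem modify_market (a b c d : List (List (String × Option String))) (v : List (String × Option String)) :
    (mkD a b c d).modify "market_data_issues" [] (· ++ [v]) = mkD a (b ++ [v]) c d := by rfl
theorem modify_news (a b c d : List (List (String × Option String))) (v : List (String × Option String)) :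
    (mkD a b c d).modify "news_issues" [] (· ++ [v]) = mkD a b (c ++ [v]) d := by rfl
theorem modify_manual (a b c d : List (List (String × Option String))) (v : List (String × Option String)) :
    (mkD a b c d).modify "manual_review" [] (· ++ [v]) = mkD a b c (d ++ [v]) := by rfl

theorem pipeline_loop (rows : List (List (String × Option String)))
    (a b c d : List (List (String × Option String))) :
    (rows.flatMap (fun row => (bucketsOf row).map (fun name => (name, issue_item_alt row)))).foldl
        (fun d p => d.modify p.1 [] (· ++ [p.2])) (mkD a b c d) =
      mkD (a ++ fMapped rows) (b ++ fMarket rows) (c ++ fNews rows) (d ++ fManual rows) := by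
  induction rows generalizing a b c d with
  | nil => simp [fMapped, fMarket, fNews, fManual]
  | cons r rs ih =>
    rw [List.flatMap_cons, List.foldl_append]
    have hstep : ((bucketsOf r).map (fun name => (name, issue_item_alt r))).foldl
        (fun d p => d.modify p.1 [] (· ++ [p.2])) (mkD a b c d) =
        mkD (a ++ fMapped [r]) (b ++ fMarket [r]) (c ++ fNews [r]) (d ++ fManual [r]) := by
      rw [issue_item_alt_eq]
      unfold bucketsOf fMapped fMarket fNews fManual
      unfold pvGetA pvGetB
      split_ifs <;>
        simp_all [modify_mapped, modify_market, modify_news, modify_manual]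
    rw [hstep, ih]
    simp only [fMapped, fMarket, fNews, fManual, List.filter_cons, List.append_assoc]
    split_ifs <;> simp_all

-- ===== VERDICT (by name: the statement is the Claim_ definition above) =====
theorem mapping_issues_payload_py_spec : Claim_equal_mapping_issues_payload_py := by
  intro rows _
  unfold Spec_mapping_issues_payload_py mapping_issues_payload_py mapping_issues_payload_py_alt
  dsimp only
  rw [show (pvBucketNames.foldl (fun d name => d.insert name []) PySem.Dict.empty)
        = mkD [] [] [] [] from by decide]
  rw [pipeline_loop]
  simp [mkD, fMapped, fMarket, fNews, fManual]
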